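-- pv_equiv track=rewrite | github.com/RoryGlenn/Google-Jobs-Scraper | parse_data.py | get_occurrences
-- ===== SOURCE A (Python) =====
-- import collections
-- import collections
--
-- def get_occurrences(data, col_name):
--     """
--     Returns a list of tuples containing the frequency of occurrence of each unique value in the specified column of the input data.
--
--     Args:
--         data (list): A list of dictionaries representing job data.
--         col_name (str): The name of the column to analyze.
--
--     Returns:
--         list: A list of tuples, where each tuple contains a unique value from the specified column and its frequency of occurrence in the input data.
--
--     """
--     result = []
--     for job_dict in data:
--         column_data = job_dict[col_name]
--         column_data = column_data.strip().lower()
--         result.append(column_data)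
--
--     title_freq = dict(collections.Counter(result))
--     return sorted(title_freq.items(), key=lambda x: x[1], reverse=True)
-- ===== SOURCE B (Python) =====
-- def get_occurrences(data, col_name):
--     counts = {}
--     for job_dict in data:
--         v = job_dict[col_name].strip().lower()
--         counts[v] = counts.get(v, 0) + 1
--     m = 0
--     for c in counts.values():
--         if c > m:
--             m = c
--     buckets = [[] for _ in range(m + 1)]
--     for v, c in counts.items():
--         buckets[c].append(v)
--     out = []
--     for k in range(m, 0, -1):
--         for v in buckets[k]:
--             out.append((v, k))
--     return out
-- ===== Notes on version B (the rewrite author's own statement) =====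
-- stated objective: alternative
-- what changed: Replaces Counter + stable comparison sort (reverse=True by count) with a counting/bucket sort: one counting pass over the data, then values are dropped into frequency buckets in first-seen order and emitted from the highest bucket down, which reproduces the stable descending tie order exactly.
import Mathlib
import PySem

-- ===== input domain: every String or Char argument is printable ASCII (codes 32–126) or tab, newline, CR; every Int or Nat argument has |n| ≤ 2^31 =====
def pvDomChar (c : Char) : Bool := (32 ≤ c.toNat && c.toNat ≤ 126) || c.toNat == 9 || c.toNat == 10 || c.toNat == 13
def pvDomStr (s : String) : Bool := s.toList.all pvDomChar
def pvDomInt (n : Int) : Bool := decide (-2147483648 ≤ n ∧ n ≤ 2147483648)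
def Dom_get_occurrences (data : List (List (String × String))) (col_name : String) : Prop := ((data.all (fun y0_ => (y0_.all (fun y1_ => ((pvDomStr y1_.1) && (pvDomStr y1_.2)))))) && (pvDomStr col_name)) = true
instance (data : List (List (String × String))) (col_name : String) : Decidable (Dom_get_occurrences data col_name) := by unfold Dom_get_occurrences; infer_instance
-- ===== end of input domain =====

-- B replaces A's Counter + stable descending comparison sort with a counting/bucket sort
-- (buckets filled in first-seen order, emitted from the highest count down); return values are
-- proved equal on Pre_ (every row contains the column key; elsewhere both Pythons raise KeyError).

-- ===== PORT A =====
def get_occurrences (data : List (List (String × String))) (col_name : String) : List (String × Int) :=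
  let result := data.foldl (fun res job_dict =>
    -- job_dict[col_name] : total via getD under Pre_ (key present; Python raises KeyError otherwise)
    let column_data := PySem.Dict.getD (PySem.Dict.mk job_dict) col_name ""
    let column_data := PySem.Str.lower (PySem.Str.strip column_data)
    res ++ [column_data]) []
  let title_freq := PySem.Dict.counter result     -- dict(collections.Counter(result))
  PySem.List.sorted title_freq.items (fun x => x.2) true

-- ===== PORT B =====
def get_occurrences_alt (data : List (List (String × String))) (col_name : String) : List (String × Int) :=
  let counts := data.foldl (fun d job_dict =>
    let v := PySem.Str.lower (PySem.Str.strip (PySem.Dict.getD (PySem.Dict.mk job_dict) col_name ""))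
    PySem.Dict.modify d v 0 (· + 1)) PySem.Dict.empty     -- counts[v] = counts.get(v, 0) + 1
  let m := counts.values.foldl (fun m c => if c > m then c else m) 0
  let buckets := counts.items.foldl (fun bk p =>
    PySem.List.pySetD bk p.2 (PySem.List.pyGetD bk p.2 [] ++ [p.1]))
    (List.replicate (m + 1).toNat ([] : List String))     -- buckets[c].append(v)
  (PySem.List.pyRange m 0 (-1)).foldl (fun out k =>
    out ++ (PySem.List.pyGetD buckets k []).map (fun v => (v, k))) []

-- ===== PRECONDITION & SPEC =====
-- Pre_ excludes exactly the inputs on which A raises KeyError: a row missing col_name.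
def Pre_get_occurrences (data : List (List (String × String))) (col_name : String) : Prop :=
  (data.all (fun row => (PySem.Dict.mk row).contains col_name)) = true
instance (data : List (List (String × String))) (col_name : String) : Decidable (Pre_get_occurrences data col_name) := by unfold Pre_get_occurrences; infer_instance

def pvWitness_get_occurrences : (List (List (String × String))) × String :=
  ([[("title", "  Dev ")], [("title", "dev")], [("title", "QA")]], "title")

def Spec_get_occurrences (data : List (List (String × String))) (col_name : String) (out : List (String × Int)) : Prop := out = get_occurrences_alt data col_name
instance (data : List (List (String × String))) (col_name : String) (out : List (String × Int)) : Decidable (Spec_get_occurrences data col_name out) := by unfold Spec_get_occurrences; infer_instance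

-- ===== CLAIM (what is proved, stated in full; the proofs are below) =====
def Claim_equal_get_occurrences : Prop := ∀ (data : List (List (String × String))) (col_name : String), Dom_get_occurrences data col_name → Pre_get_occurrences data col_name → Spec_get_occurrences data col_name (get_occurrences data col_name)

-- ===== LEMMAS AND PROOFS =====

-- insertBy drops x exactly between a prefix it does not go before and a suffix it goes before
theorem pv_insertBy_append {α : Type} (before : α → α → Bool) (x : α) (A B : List α)
    (hA : ∀ y ∈ A, before x y = false) (hB : ∀ y ∈ B, before x y = true) :
    PySem.List.insertBy before x (A ++ B) = A ++ x :: B := by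
  induction A with
  | nil =>
    cases B with
    | nil => simp [PySem.List.insertBy]
    | cons b bs => simp [PySem.List.insertBy, hB b (by simp)]
  | cons a A ih =>
    have ha : before x a = false := hA a (by simp)
    simp only [List.cons_append, PySem.List.insertBy, ha, Bool.false_eq_true, if_false]
    rw [ih (fun y hy => hA y (by simp [hy]))]

-- stable reverse sort = concatenation of the key-classes, taken along any strictly
-- decreasing enumeration ks of (a superset of) the keys
theorem pv_sorted_rev_eq_flatMap {α : Type} (key : α → Int) (ks : List Int) (L : List α)
    (hks : List.Pairwise (fun a b => b < a) ks) (hmem : ∀ x ∈ L, key x ∈ ks) :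
    PySem.List.sorted L key true = ks.flatMap (fun k => L.filter (fun x => key x = k)) := by
  rw [PySem.List.sorted_rev_eq_foldl_insertBy]
  induction L using List.reverseRecOn with
  | nil => simp
  | append_singleton L x ih =>
    have hmemL : ∀ y ∈ L, key y ∈ ks := fun y hy => hmem y (by simp [hy])
    have hx : key x ∈ ks := hmem x (by simp)
    obtain ⟨ks₁, ks₂, hsplit⟩ := List.append_of_mem hx
    subst hsplit
    rw [List.foldl_append, List.foldl_cons, List.foldl_nil, ih hmemL]
    have hpw := hks
    rw [List.pairwise_append] at hpw
    obtain ⟨hp₁, hp₂, hcross⟩ := hpw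
    rw [List.pairwise_cons] at hp₂
    obtain ⟨hlt₂, _⟩ := hp₂
    -- decompose the flatMap over ks₁ ++ key x :: ks₂
    rw [List.flatMap_append, List.flatMap_cons]
    rw [List.flatMap_append, List.flatMap_cons]
    have hA : ∀ y ∈ ks₁.flatMap (fun k => L.filter (fun z => key z = k)) ++
        L.filter (fun z => key z = key x), (decide (key y < key x)) = false := by
      intro y hy
      rcases List.mem_append.1 hy with hy | hy
      · obtain ⟨k, hk, hyf⟩ := List.mem_flatMap.1 hy
        have := List.of_mem_filter hyf
        have hky : key y = k := by simpa using this
        have : key x < k := hcross k hk (key x) (by simp)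
        simp [hky]; omega
      · have := List.of_mem_filter hy
        have hky : key y = key x := by simpa using this
        simp [hky]
    have hB : ∀ y ∈ ks₂.flatMap (fun k => L.filter (fun z => key z = k)),
        (decide (key y < key x)) = true := by
      intro y hy
      obtain ⟨k, hk, hyf⟩ := List.mem_flatMap.1 hy
      have := List.of_mem_filter hyf
      have hky : key y = k := by simpa using this
      have : k < key x := hlt₂ k hk
      simp [hky]; omega
    have hins := pv_insertBy_append (fun a b => decide (key b < key a)) x
      (ks₁.flatMap (fun k => L.filter (fun z => key z = k)) ++ L.filter (fun z => key z = key x))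
      (ks₂.flatMap (fun k => L.filter (fun z => key z = k)))
      (by intro y hy; exact hA y hy) (by intro y hy; exact hB y hy)
    rw [← List.append_assoc] at *
    rw [hins]
    -- now rewrite the filters over L ++ [x]
    have hf₁ : ks₁.flatMap (fun k => (L ++ [x]).filter (fun z => key z = k)) =
        ks₁.flatMap (fun k => L.filter (fun z => key z = k)) := by
      apply List.flatMap_congr ?_
      intro k hk
      have hne : ¬ (key x = k) := by
        have : key x < k := hcross k hk (key x) (by simp)
        omega
      simp [List.filter_append, hne]
    have hf₂ : ks₂.flatMap (fun k => (L ++ [x]).filter (fun z => key z = k)) =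
        ks₂.flatMap (fun k => L.filter (fun z => key z = k)) := by
      apply List.flatMap_congr ?_
      intro k hk
      have hne : ¬ (key x = k) := by
        have : k < key x := hlt₂ k hk
        omega
      simp [List.filter_append, hne]
    have hfx : (L ++ [x]).filter (fun z => key z = key x) =
        L.filter (fun z => key z = key x) ++ [x] := by
      simp [List.filter_append]
    rw [hf₁, hf₂, hfx]
    simp

-- the bucket-filling loop: bucket k holds (in order) the first components of the items with count k
theorem pv_buckets_spec (m : Int) (L : List (String × Int)) (b : List (List String))
    (hb : b.length = (m + 1).toNat) (hL : ∀ p ∈ L, 1 ≤ p.2 ∧ p.2 ≤ m) (k : Int)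
    (hk0 : 0 ≤ k) :
    PySem.List.pyGetD (L.foldl (fun bk p =>
        PySem.List.pySetD bk p.2 (PySem.List.pyGetD bk p.2 [] ++ [p.1])) b) k [] =
      PySem.List.pyGetD b k [] ++ (L.filter (fun p => p.2 = k)).map (·.1) := by
  induction L generalizing b with
  | nil => simp
  | cons p L ih =>
    obtain ⟨hp1, hpm⟩ := hL p (by simp)
    have hc : ((p.2.toNat : Nat) : Int) = p.2 := Int.toNat_of_nonneg (by omega)
    have hkc : ((k.toNat : Nat) : Int) = k := Int.toNat_of_nonneg hk0
    have hlt : p.2.toNat < b.length := by rw [hb]; omega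
    simp only [List.foldl_cons]
    rw [ih (PySem.List.pySetD b p.2 (PySem.List.pyGetD b p.2 [] ++ [p.1]))
        (by rw [PySem.List.length_pySetD, hb])
        (fun q hq => hL q (by simp [hq]))]
    rw [← hc, ← hkc, PySem.List.pyGetD_pySetD_natCast _ _ _ _ _ hlt]
    by_cases hkp : k = p.2
    · have : k.toNat = p.2.toNat := by rw [hkp]
      rw [if_pos this, hkc, hc]
      have : (p :: L).filter (fun q => q.2 = k) = p :: L.filter (fun q => q.2 = k) := by
        simp [hkp.symm]
      rw [this]
      simp [hkp]
    · have : k.toNat ≠ p.2.toNat := by omega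
      rw [if_neg this, hkc]
      have : (p :: L).filter (fun q => q.2 = k) = L.filter (fun q => q.2 = k) := by
        have : ¬ (p.2 = k) := fun h => hkp h.symm
        simp [this]
      rw [this]

-- shared core: both ports, applied to the list of normalized values, reduce to the same flatMap
theorem pv_core (vals : List String) :
    PySem.List.sorted (PySem.Dict.counter vals).items (fun x => x.2) true =
    (let counts := PySem.Dict.counter vals
     let m := counts.values.foldl (fun m c => if c > m then c else m) 0
     let buckets := counts.items.foldl (fun bk p =>
        PySem.List.pySetD bk p.2 (PySem.List.pyGetD bk p.2 [] ++ [p.1]))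
        (List.replicate (m + 1).toNat ([] : List String))
     (PySem.List.pyRange m 0 (-1)).foldl (fun out k =>
        out ++ (PySem.List.pyGetD buckets k []).map (fun v => (v, k))) []) := by
  simp only
  set items := (PySem.Dict.counter vals).items with hitems
  set m := (PySem.Dict.counter vals).values.foldl (fun m c => if c > m then c else m) 0 with hm
  -- the running max loop is foldl max
  have hmax : m = (PySem.Dict.counter vals).values.foldl max 0 := by
    rw [hm]
    apply PySem.List.foldl_congr_mem
    intro acc c _
    by_cases h : c > acc
    · simp [h, max_eq_right (le_of_lt h)]
    · simp [h, max_eq_left (not_lt.mp h)]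
  have hm0 : 0 ≤ m := by rw [hmax]; exact (PySem.List.le_foldl_max _ _).1
  have hmle : ∀ c ∈ (PySem.Dict.counter vals).values, c ≤ m := by
    rw [hmax]; exact (PySem.List.le_foldl_max _ _).2
  have hrange : ∀ p ∈ items, 1 ≤ p.2 ∧ p.2 ≤ m := by
    intro p hp
    constructor
    · rw [hitems, PySem.Dict.items_counter] at hp
      obtain ⟨s, hs, hpe⟩ := List.mem_map.1 hp
      have hsv : s ∈ vals := (PySem.Set.mem_ofList vals s).1 hs
      have : 0 < vals.count s := List.count_pos_iff.2 hsv
      rw [← hpe]; simp; omega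
    · exact hmle p.2 (by
        simp only [PySem.Dict.values]
        exact List.mem_map.2 ⟨p, hp, rfl⟩)
  -- buckets
  have hbk : ∀ k : Int, 0 ≤ k → k ≤ m →
      PySem.List.pyGetD (items.foldl (fun bk p =>
        PySem.List.pySetD bk p.2 (PySem.List.pyGetD bk p.2 [] ++ [p.1]))
        (List.replicate (m + 1).toNat ([] : List String))) k [] =
      (items.filter (fun p => p.2 = k)).map (·.1) := by
    intro k hk0 hkm
    rw [pv_buckets_spec m items _ (by simp) hrange k hk0]
    have hkc : ((k.toNat : Nat) : Int) = k := Int.toNat_of_nonneg hk0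
    rw [← hkc, PySem.List.pyGetD_natCast]
    simp
  -- the emitting loop is a flatMap
  rw [PySem.List.foldl_append_eq_flatMap]
  rw [List.nil_append]
  -- A side: stable reverse sort over the countdown range
  rw [pv_sorted_rev_eq_flatMap (fun p => p.2) (PySem.List.pyRange m 0 (-1)) items
      (by
        rw [PySem.List.pyRange_neg_one, List.pairwise_map]
        refine List.Pairwise.imp ?_ List.pairwise_lt_range
        intro a b hab
        omega)
      (by
        intro p hp
        have h1 := (hrange p hp).1
        have h2 := (hrange p hp).2
        exact PySem.List.mem_pyRange_neg_one.2 ⟨show (0:Int) < p.2 by omega, h2⟩)]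
  apply List.flatMap_congr ?_
  intro k hk
  have hk' := PySem.List.mem_pyRange_neg_one.1 hk
  rw [hbk k (by omega) hk'.2]
  -- ((filter).map fst).map (·, k) = filter
  symm
  rw [List.map_map]
  have hid : ∀ p ∈ items.filter (fun p => decide (p.2 = k)),
      ((fun v => (v, k)) ∘ fun x => x.1) p = p := by
    intro p hp
    have hpk : p.2 = k := by simpa using List.of_mem_filter hp
    simp [Function.comp, ← hpk]
  rw [List.map_congr_left hid]
  simp

-- ===== VERDICT (by name: the statement is the Claim_ definition above) =====
theorem get_occurrences_spec : Claim_equal_get_occurrences := by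
  intro data col_name _ _
  unfold Spec_get_occurrences get_occurrences get_occurrences_alt
  simp only
  rw [PySem.List.foldl_append_singleton_eq_map, List.nil_append]
  have hcnt : data.foldl (fun d job_dict =>
      PySem.Dict.modify d (PySem.Str.lower (PySem.Str.strip
        (PySem.Dict.getD (PySem.Dict.mk job_dict) col_name ""))) 0 (· + 1)) PySem.Dict.empty =
      PySem.Dict.counter (data.map (fun job_dict => PySem.Str.lower (PySem.Str.strip
        (PySem.Dict.getD (PySem.Dict.mk job_dict) col_name "")))) := by
    rw [PySem.Dict.counter_eq_foldl, List.foldl_map]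
  rw [hcnt]
  exact pv_core _
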